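-- pv_equiv track=rewrite | github.com/MclPio/judgement-ai | judgement_ai/grading/parsing.py | select_final_score
-- ===== SOURCE A (Python) =====
-- from collections import Counter
--
-- def select_final_score(scores: list[int]) -> int:
--     """Select the majority score, or the middle value when tied."""
--     counts = Counter(scores)
--     top_count = max(counts.values())
--     winners = [score for score, count in counts.items() if count == top_count]
--     if len(winners) == 1:
--         return winners[0]
--
--     sorted_scores = sorted(scores)
--     return sorted_scores[len(sorted_scores) // 2]
-- ===== SOURCE B (Python) =====
-- def select_final_score(scores: list[int]) -> int:
--     """Select the majority score, or the middle value when tied.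
--
--     Sort once, group the sorted list into runs of equal values, and reuse the
--     sort for the median on ties (no Counter)."""
--     sorted_scores = sorted(scores)
--     runs = []
--     for x in sorted_scores:
--         if runs and runs[-1][0] == x:
--             v, c = runs[-1]
--             runs[-1] = (v, c + 1)
--         else:
--             runs.append((x, 1))
--     top = max(c for _, c in runs)
--     winners = [v for v, c in runs if c == top]
--     if len(winners) == 1:
--         return winners[0]
--     return sorted_scores[len(sorted_scores) // 2]
-- ===== Notes on version B (the rewrite author's own statement) =====
-- stated objective: alternative
-- what changed: Replaces the Counter hash-count with a single sort followed by a run-grouping scan over the sorted list, and reuses that same sort for the tie-breaking median.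
import Mathlib
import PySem

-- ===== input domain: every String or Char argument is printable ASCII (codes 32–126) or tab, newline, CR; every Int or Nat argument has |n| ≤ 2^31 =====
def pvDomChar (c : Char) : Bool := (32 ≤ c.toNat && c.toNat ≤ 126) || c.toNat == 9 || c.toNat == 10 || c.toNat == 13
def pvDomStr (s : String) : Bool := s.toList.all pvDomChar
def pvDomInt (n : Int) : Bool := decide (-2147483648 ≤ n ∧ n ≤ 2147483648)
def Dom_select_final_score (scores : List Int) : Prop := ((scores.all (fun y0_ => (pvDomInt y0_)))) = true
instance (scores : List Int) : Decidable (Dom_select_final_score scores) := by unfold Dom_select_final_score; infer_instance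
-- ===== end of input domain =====

-- B replaces A's Counter hash-count by one sort plus a run-grouping scan over the sorted list (alternative algorithm, same asymptotic cost); the sort is reused for the tie-breaking median.

-- ===== PORT A =====
def select_final_score (scores : List Int) : Int :=
  let counts : PySem.Dict Int Int := PySem.Dict.counter scores
  match PySem.List.max? counts.values (fun v => v) with
  | none => 0   -- unreachable under Pre_: Python's max raises ValueError on an empty Counter
  | some top_count =>
    let winners := (counts.items.filter (fun p => p.2 == top_count)).map (fun p => p.1)
    if winners.length == 1 then PySem.List.pyGetD winners 0 0
    else
      let sorted_scores := PySem.List.sorted scores (fun x => x) false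
      PySem.List.pyGetD sorted_scores (PySem.Int.floordiv (sorted_scores.length : Int) 2) 0

-- ===== PORT B =====
-- one iteration of Source B's run-grouping loop (extend runs[-1] or append a fresh run)
def pvRunStep (runs : List (Int × Int)) (x : Int) : List (Int × Int) :=
  match runs.getLast? with
  | some (v, c) => if v == x then runs.dropLast ++ [(v, c + 1)] else runs ++ [(x, 1)]
  | none => [(x, 1)]

def select_final_score_alt (scores : List Int) : Int :=
  let sorted_scores := PySem.List.sorted scores (fun x => x) false
  let runs := sorted_scores.foldl pvRunStep []
  match PySem.List.max? (runs.map (fun p => p.2)) (fun v => v) with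
  | none => 0   -- unreachable under Pre_: Python's max raises ValueError on an empty sequence
  | some top =>
    let winners := (runs.filter (fun p => p.2 == top)).map (fun p => p.1)
    if winners.length == 1 then PySem.List.pyGetD winners 0 0
    else PySem.List.pyGetD sorted_scores (PySem.Int.floordiv (sorted_scores.length : Int) 2) 0

-- ===== PRECONDITION & SPEC =====
-- Pre_ excludes only the empty list, on which both A's and B's Python raise ValueError (max of an empty sequence).
def Pre_select_final_score (scores : List Int) : Prop := scores ≠ []
instance (scores : List Int) : Decidable (Pre_select_final_score scores) := by unfold Pre_select_final_score; infer_instance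
def pvWitness_select_final_score : List Int := [1, 2, 2]

def Spec_select_final_score (scores : List Int) (out : Int) : Prop := out = select_final_score_alt scores
instance (scores : List Int) (out : Int) : Decidable (Spec_select_final_score scores out) := by unfold Spec_select_final_score; infer_instance

-- ===== CLAIM (what is proved, stated in full; the proofs are below) =====
def Claim_equal_select_final_score : Prop := ∀ (scores : List Int), Dom_select_final_score scores → Pre_select_final_score scores → Spec_select_final_score scores (select_final_score scores)

-- ===== LEMMAS AND PROOFS =====

theorem pvOfList_append_singleton (l : List Int) (x : Int) :
    PySem.Set.ofList (l ++ [x]) = (PySem.Set.ofList l).add x := by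
  simp [PySem.Set.ofList, List.foldl_append]

theorem pvAdd_of_mem (s : PySem.Set Int) (x : Int) (h : x ∈ s) : s.add x = s := by
  simp [PySem.Set.add]; exact h

theorem pvAdd_of_not_mem (s : PySem.Set Int) (x : Int) (h : x ∉ s) : s.add x = s ++ [x] := by
  simp [PySem.Set.add]; exact h

theorem pvDedup_lt (pre : List Int) (h : pre.Pairwise (· ≤ ·)) :
    (PySem.List.dedup pre).Pairwise (· < ·) := by
  induction pre using List.reverseRecOn with
  | nil => simp [PySem.List.dedup, PySem.Set.ofList]
  | append_singleton pre x ih =>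
    obtain ⟨h1, -, hrel⟩ := List.pairwise_append.mp h
    unfold PySem.List.dedup at *
    rw [pvOfList_append_singleton]
    by_cases hx : x ∈ PySem.Set.ofList pre
    · rw [pvAdd_of_mem _ _ hx]; exact ih h1
    · rw [pvAdd_of_not_mem _ _ hx]
      refine List.pairwise_append.mpr ⟨ih h1, by simp, ?_⟩
      intro a ha b hb
      rw [List.mem_singleton] at hb
      have hamem : a ∈ pre := (PySem.Set.mem_ofList pre a).mp ha
      have h1 : a ≤ x := hrel a hamem x (by simp)
      have hne : a ≠ x := fun he => hx (he ▸ ha)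
      subst hb; omega

theorem pvLast_dedup (pre : List Int) (x : Int) (hp : pre.Pairwise (· ≤ ·))
    (hx : x ∈ pre) (hmax : ∀ a ∈ pre, a ≤ x) :
    (PySem.List.dedup pre).getLast? = some x := by
  have hxd : x ∈ PySem.List.dedup pre := (PySem.List.mem_dedup pre x).mpr hx
  have hne : PySem.List.dedup pre ≠ [] := List.ne_nil_of_mem hxd
  obtain ⟨D, g, hDg⟩ : ∃ D g, PySem.List.dedup pre = D ++ [g] :=
    ⟨(PySem.List.dedup pre).dropLast, (PySem.List.dedup pre).getLast hne,
      (List.dropLast_append_getLast hne).symm⟩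
  have hlt := pvDedup_lt pre hp
  rw [hDg] at hlt hxd ⊢
  rw [List.getLast?_concat]
  obtain ⟨-, -, hrel⟩ := List.pairwise_append.mp hlt
  have hg : g ∈ pre := (PySem.List.mem_dedup pre g).mp (by rw [hDg]; simp)
  rcases List.mem_append.mp hxd with hD | hxg
  · have := hrel x hD g (by simp)
    have := hmax g hg
    omega
  · simp at hxg; rw [hxg]

theorem pvStep_eq (pre : List Int) (x : Int) (hp : (pre ++ [x]).Pairwise (· ≤ ·)) :
    pvRunStep ((PySem.List.dedup pre).map (fun v => (v, (pre.count v : Int)))) x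
    = (PySem.List.dedup (pre ++ [x])).map (fun v => (v, ((pre ++ [x]).count v : Int))) := by
  obtain ⟨h1, -, hrel⟩ := List.pairwise_append.mp hp
  have hmax : ∀ a ∈ pre, a ≤ x := fun a ha => hrel a ha x (by simp)
  have hdd : PySem.List.dedup (pre ++ [x]) = PySem.Set.add (PySem.List.dedup pre) x := by
    unfold PySem.List.dedup; exact pvOfList_append_singleton pre x
  by_cases hmem : x ∈ pre
  · -- x already occurs: the last run is (x, count x pre) and gets extended
    have hxd : x ∈ PySem.List.dedup pre := (PySem.List.mem_dedup pre x).mpr hmem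
    rw [hdd, pvAdd_of_mem (PySem.List.dedup pre) x hxd]
    have hlast := pvLast_dedup pre x h1 hmem hmax
    obtain ⟨D, hD⟩ : ∃ D, PySem.List.dedup pre = D ++ [x] := by
      have hne : PySem.List.dedup pre ≠ [] := List.ne_nil_of_mem hxd
      refine ⟨(PySem.List.dedup pre).dropLast, ?_⟩
      have := List.dropLast_append_getLast hne
      rw [List.getLast?_eq_some_getLast hne] at hlast
      rw [← Option.some_inj.mp hlast]; exact this.symm
    have hxD : x ∉ D := by
      have hnd := PySem.List.nodup_dedup pre
      rw [hD] at hnd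
      exact fun hx' => (List.nodup_append.mp hnd).2.2 x hx' x (by simp) rfl
    rw [hD]
    unfold pvRunStep
    simp only [List.map_append, List.map_cons, List.map_nil, List.getLast?_concat]
    simp only [beq_self_eq_true, if_true]
    rw [List.dropLast_concat]
    have hcount_last : ((pre ++ [x]).count x : Int) = (pre.count x : Int) + 1 := by
      simp [List.count_append]
    rw [hcount_last]
    congr 1
    apply List.map_congr_left
    intro v hv
    have hvx : v ≠ x := fun he => hxD (he ▸ hv)
    simp [List.count_append]
    exact List.count_eq_zero.mpr (by simp [hvx])
  · -- x is new: a fresh run (x, 1) is appended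
    have hxd : x ∉ PySem.List.dedup pre := fun h => hmem ((PySem.List.mem_dedup pre x).mp h)
    rw [hdd, pvAdd_of_not_mem (PySem.List.dedup pre) x hxd]
    have hcx : ((pre ++ [x]).count x : Int) = 1 := by
      simp [List.count_append, List.count_eq_zero_of_not_mem hmem]
    have hmapeq : (PySem.List.dedup pre).map (fun v => (v, ((pre ++ [x]).count v : Int)))
        = (PySem.List.dedup pre).map (fun v => (v, (pre.count v : Int))) := by
      apply List.map_congr_left
      intro v hv
      have hvx : v ≠ x := fun he => hxd (he ▸ hv)
      simp [List.count_append]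
      exact List.count_eq_zero.mpr (by simp [hvx])
    rw [List.map_append, hmapeq, List.map_cons, List.map_nil, hcx]
    unfold pvRunStep
    rw [List.getLast?_map]
    rcases hD : (PySem.List.dedup pre).getLast? with - | v
    · have h0 : PySem.List.dedup pre = [] := List.getLast?_eq_none_iff.mp hD
      simp only [PySem.List.dedup] at h0
      simp [PySem.List.dedup, h0]
    · have hvd : v ∈ PySem.List.dedup pre := List.mem_of_getLast? hD
      have hvx : v ≠ x := fun he => hxd (he ▸ hvd)
      simp only [Option.map_some]
      rw [if_neg (by simpa using hvx)]

theorem pvRuns_char (rest pre : List Int) (h : (pre ++ rest).Pairwise (· ≤ ·)) :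
    rest.foldl pvRunStep ((PySem.List.dedup pre).map (fun v => (v, (pre.count v : Int)))) =
    (PySem.List.dedup (pre ++ rest)).map (fun v => (v, ((pre ++ rest).count v : Int))) := by
  induction rest generalizing pre with
  | nil => simp
  | cons x rest ih =>
    rw [List.foldl_cons, pvStep_eq pre x ?hpx]
    case hpx =>
      have : (pre ++ [x]).Sublist (pre ++ x :: rest) :=
        List.Sublist.append_left (by simp) pre
      exact h.sublist this
    have h' : ((pre ++ [x]) ++ rest).Pairwise (· ≤ ·) := by
      rw [List.append_assoc]; simpa using h
    rw [ih (pre ++ [x]) h']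
    simp

theorem pvRuns (ss : List Int) (h : ss.Pairwise (· ≤ ·)) :
    ss.foldl pvRunStep [] = (PySem.List.dedup ss).map (fun v => (v, (ss.count v : Int))) := by
  have := pvRuns_char ss [] (by simpa using h)
  simpa [PySem.List.dedup, PySem.Set.ofList] using this

theorem pvMax_eq_of_perm {l l' : List Int} (h : l.Perm l') {a b : Int}
    (ha : PySem.List.max? l (fun y => y) = some a)
    (hb : PySem.List.max? l' (fun y => y) = some b) : a = b :=
  le_antisymm (PySem.List.max?_isMax hb a (h.mem_iff.mp (PySem.List.max?_mem ha)))
    (PySem.List.max?_isMax ha b (h.symm.mem_iff.mp (PySem.List.max?_mem hb)))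

theorem main_thm (scores : List Int) (hne : scores ≠ []) :
    select_final_score scores = select_final_score_alt scores := by
  have hperm : (PySem.List.sorted scores (fun x => x) false).Perm scores :=
    PySem.List.sorted_perm scores (fun x => x) false
  have hsorted : (PySem.List.sorted scores (fun x => x) false).Pairwise (· ≤ ·) :=
    PySem.List.sorted_pairwise scores (fun x => x)
  set ss := PySem.List.sorted scores (fun x => x) false with hss
  have hruns : ss.foldl pvRunStep [] = (PySem.List.dedup ss).map (fun v => (v, (scores.count v : Int))) := by
    rw [pvRuns ss hsorted]
    exact List.map_congr_left fun v _ => by rw [hperm.count_eq]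
  -- the two value lists are permutations of each other
  have hdperm : (PySem.List.dedup ss).Perm (PySem.Set.ofList scores) := by
    rw [(List.perm_ext_iff_of_nodup (PySem.List.nodup_dedup ss) (PySem.Set.nodup_ofList scores))]
    intro a
    rw [PySem.List.mem_dedup, PySem.Set.mem_ofList, hperm.mem_iff]
  have hvalsA : (PySem.Dict.counter scores).values
      = (PySem.Set.ofList scores).map (fun k => (scores.count k : Int)) := by
    show ((PySem.Dict.counter scores).items).map (fun p => p.2) = _
    rw [PySem.Dict.items_counter, List.map_map]
    rfl
  have hvperm : ((ss.foldl pvRunStep []).map (fun p => p.2)).Perm ((PySem.Dict.counter scores).values) := by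
    rw [hruns, hvalsA, List.map_map]
    exact hdperm.map _
  -- neither side sees an empty list
  have hofne : PySem.Set.ofList scores ≠ [] := by
    intro h0
    rcases scores with - | ⟨a, t⟩
    · exact hne rfl
    · have : a ∈ PySem.Set.ofList (a :: t) := (PySem.Set.mem_ofList _ _).mpr (by simp)
      rw [h0] at this; simp at this
  have hAne : (PySem.Dict.counter scores).values ≠ [] := by
    rw [hvalsA]; simpa using hofne
  have hBne : ((ss.foldl pvRunStep []).map (fun p => p.2)) ≠ [] := by
    intro h0
    rw [h0] at hvperm
    exact hAne (List.Perm.eq_nil hvperm.symm)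
  rcases hA : PySem.List.max? ((PySem.Dict.counter scores).values) (fun v => v) with - | tA
  · exact absurd ((PySem.List.max?_eq_none_iff _ _).mp hA) hAne
  rcases hB : PySem.List.max? ((ss.foldl pvRunStep []).map (fun p => p.2)) (fun v => v) with - | tB
  · exact absurd ((PySem.List.max?_eq_none_iff _ _).mp hB) hBne
  have htop : tB = tA := pvMax_eq_of_perm hvperm hB hA
  subst htop
  -- winners
  have hwA : ((PySem.Dict.counter scores).items.filter (fun p => p.2 == tB)).map (fun p => p.1)
      = (PySem.Set.ofList scores).filter (fun k => (scores.count k : Int) == tB) := by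
    rw [PySem.Dict.items_counter, List.filter_map, List.map_map]
    simp only [Function.comp_def]
    simp
  have hwB : ((ss.foldl pvRunStep []).filter (fun p => p.2 == tB)).map (fun p => p.1)
      = (PySem.List.dedup ss).filter (fun k => (scores.count k : Int) == tB) := by
    rw [hruns, List.filter_map, List.map_map]
    simp only [Function.comp_def]
    simp
  have hwperm : ((ss.foldl pvRunStep []).filter (fun p => p.2 == tB)).map (fun p => p.1)
      |>.Perm (((PySem.Dict.counter scores).items.filter (fun p => p.2 == tB)).map (fun p => p.1)) := by
    rw [hwA, hwB]
    exact hdperm.filter _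
  -- now evaluate both definitions
  unfold select_final_score select_final_score_alt
  rw [← hss]
  simp only [hA, hB]
  rw [hwperm.length_eq]
  split_ifs with hlen
  · -- a unique majority score on both sides: the two singleton winner lists agree
    have hlenA : (((PySem.Dict.counter scores).items.filter (fun p => p.2 == tB)).map (fun p => p.1)).length = 1 := by
      simpa using hlen
    obtain ⟨a, ha⟩ := List.length_eq_one_iff.mp hlenA
    obtain ⟨b, hb⟩ := List.length_eq_one_iff.mp (hwperm.length_eq.trans hlenA)
    rw [ha, hb]
    have hba : b = a := by
      have hp := hwperm
      rw [ha, hb] at hp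
      simpa using List.perm_singleton.mp hp
    rw [hba]
  · rfl

-- ===== VERDICT (by name: the statement is the Claim_ definition above) =====
theorem select_final_score_spec : Claim_equal_select_final_score := by
  intro scores _ hne
  unfold Spec_select_final_score
  exact main_thm scores hne
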